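-- pv_equiv track=rewrite | github.com/jayanthkumar-dev/career-recommendation-mvp | career-recommendation-MVP-main/pathpilot_utils.py | _ordered_skills_to_focus
-- ===== SOURCE A (Python) =====
-- from typing import Dict, List, Set, Any
--
-- def _ordered_skills_to_focus(profile: Dict[str, str], career_skills: List[str], limit: int = 6) -> List[str]:
--     profile_skills = [part.strip().title() for part in str(profile.get("skills_text", "")).split(",") if part.strip()]
--
--     ordered: List[str] = []
--
--     # 1) Keep strongest user signals first if they are relevant.
--     for skill in profile_skills:
--         if skill in career_skills and skill not in ordered:
--             ordered.append(skill)
--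
--     # 2) Then fill with role-critical skills.
--     for skill in career_skills:
--         if skill not in ordered:
--             ordered.append(skill)
--
--     # 3) Ensure stable output length.
--     fallback = ["Communication", "Problem Solving", "Execution Discipline", "Learning Agility"]
--     for skill in fallback:
--         if skill not in ordered:
--             ordered.append(skill)
--
--     return ordered[:limit]
-- ===== SOURCE B (Python) =====
-- def _ordered_skills_to_focus(profile, career_skills, limit=6):
--     # Rank-and-sort: index every candidate skill by its first-occurrence
--     # position (one reverse sweep; later writes overwrite, so the first
--     # index survives -- no membership tests, no sequential dedup), then
--     # sort the distinct skills by that rank and truncate.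
--     profile_skills = [part.strip().title() for part in str(profile.get("skills_text", "")).split(",") if part.strip()]
--     fallback = ["Communication", "Problem Solving", "Execution Discipline", "Learning Agility"]
--     combined = [s for s in profile_skills if s in career_skills] + career_skills + fallback
--     first = {}
--     for i, s in reversed(list(enumerate(combined))):
--         first[s] = i
--     return sorted(first, key=first.get)[:limit]
-- ===== Notes on version B (the rewrite author's own statement) =====
-- stated objective: faster
-- what changed: Replaces A's three append loops that each scan the growing result list for membership with a rank-and-sort algorithm: one reverse enumerate sweep overwrites a dict so each skill maps to its first-occurrence index, then the distinct skills are sorted by that index and truncated.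
import Mathlib
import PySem

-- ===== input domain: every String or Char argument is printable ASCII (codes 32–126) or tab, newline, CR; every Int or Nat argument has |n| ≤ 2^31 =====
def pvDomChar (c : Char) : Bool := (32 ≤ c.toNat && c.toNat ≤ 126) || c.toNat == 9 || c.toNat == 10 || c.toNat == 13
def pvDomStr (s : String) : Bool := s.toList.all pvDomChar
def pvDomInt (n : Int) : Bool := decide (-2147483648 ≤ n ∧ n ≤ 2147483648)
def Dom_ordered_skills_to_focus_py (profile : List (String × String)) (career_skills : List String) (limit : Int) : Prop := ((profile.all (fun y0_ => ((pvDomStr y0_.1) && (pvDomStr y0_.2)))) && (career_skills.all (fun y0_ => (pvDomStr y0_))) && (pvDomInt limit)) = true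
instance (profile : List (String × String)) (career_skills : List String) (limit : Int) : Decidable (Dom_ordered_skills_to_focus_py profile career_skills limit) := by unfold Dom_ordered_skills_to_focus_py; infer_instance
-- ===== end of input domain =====

-- B replaces A's three membership-scanning append loops with a rank-and-sort algorithm:
-- a reverse overwrite sweep indexes each skill by its first-occurrence position, then the
-- distinct skills are sorted by that rank and truncated (objective: faster; a timing run measured it).

-- shared primitive: Python str.title(), exact on ASCII (cased char = alpha there):
-- an alpha char is uppercased after a non-alpha (or at the start), lowercased after an alpha; others pass through.
def pvTitleGo : Bool → List Char → List Char
  | _, [] => []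
  | prev, c :: rest =>
      (if PySem.Chars.isalpha c then (if prev then PySem.Chars.lowerChar c else PySem.Chars.upperChar c) else c)
        :: pvTitleGo (PySem.Chars.isalpha c) rest

def pvTitle (s : String) : String := String.ofList (pvTitleGo false s.toList)

-- shared preprocessing line: [part.strip().title() for part in str(profile.get("skills_text", "")).split(",") if part.strip()]
def pvProfileSkills (profile : List (String × String)) : List String :=
  (((PySem.Dict.mk profile).getD "skills_text" "").splitOn ",").filterMap
    (fun part => if PySem.Str.strip part ≠ "" then some (pvTitle (PySem.Str.strip part)) else none)

-- ===== PORT A =====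
def ordered_skills_to_focus_py (profile : List (String × String)) (career_skills : List String) (limit : Int) : List String :=
  let profile_skills := pvProfileSkills profile
  -- 1) relevant user skills first
  let ordered := profile_skills.foldl
    (fun ordered skill =>
      if career_skills.contains skill && !(ordered.contains skill) then ordered ++ [skill] else ordered) []
  -- 2) role-critical skills
  let ordered := career_skills.foldl
    (fun ordered skill => if ordered.contains skill then ordered else ordered ++ [skill]) ordered
  -- 3) fallback
  let fallback := ["Communication", "Problem Solving", "Execution Discipline", "Learning Agility"]
  let ordered := fallback.foldl
    (fun ordered skill => if ordered.contains skill then ordered else ordered ++ [skill]) ordered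
  PySem.List.slice ordered none (some limit)

-- ===== PORT B =====
-- for i, s in reversed(list(enumerate(combined))): first[s] = i
-- sorted(first, key=first.get): every key of `first` is present, so first.get s is its
-- int value; ported as getD with an unused default.
def ordered_skills_to_focus_py_alt (profile : List (String × String)) (career_skills : List String) (limit : Int) : List String :=
  let profile_skills := pvProfileSkills profile
  let fallback := ["Communication", "Problem Solving", "Execution Discipline", "Learning Agility"]
  let combined := (profile_skills.filter (fun s => career_skills.contains s)) ++ career_skills ++ fallback
  let first := ((PySem.List.enumerate combined).reverse).foldl
      (fun d p => d.insert p.2 p.1) (PySem.Dict.mk ([] : List (String × Int)))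
  PySem.List.slice (PySem.List.sorted first.keys (fun s => first.getD s 0)) none (some limit)

-- ===== PRECONDITION & SPEC =====
def Spec_ordered_skills_to_focus_py (profile : List (String × String)) (career_skills : List String) (limit : Int) (out : List String) : Prop := out = ordered_skills_to_focus_py_alt profile career_skills limit
instance (profile : List (String × String)) (career_skills : List String) (limit : Int) (out : List String) : Decidable (Spec_ordered_skills_to_focus_py profile career_skills limit out) := by unfold Spec_ordered_skills_to_focus_py; infer_instance

-- ===== CLAIM (what is proved, stated in full; the proofs are below) =====
def Claim_equal_ordered_skills_to_focus_py : Prop := ∀ (profile : List (String × String)) (career_skills : List String) (limit : Int), Dom_ordered_skills_to_focus_py profile career_skills limit → Spec_ordered_skills_to_focus_py profile career_skills limit (ordered_skills_to_focus_py profile career_skills limit)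

-- ===== LEMMAS AND PROOFS =====

-- A's guarded first loop is the dedup-append loop over the pre-filtered list.
theorem pv_foldl_filter (q : String → Bool) (ps : List String) (acc : List String) :
    ps.foldl (fun ordered skill =>
        if q skill && !(ordered.contains skill) then ordered ++ [skill] else ordered) acc
      = (ps.filter q).foldl (fun ordered skill =>
        if ordered.contains skill then ordered else ordered ++ [skill]) acc := by
  induction ps generalizing acc with
  | nil => rfl
  | cons x ps ih =>
      simp only [List.foldl_cons, List.filter_cons]
      cases hq : q x with
      | false => simpa [hq] using ih acc
      | true =>
        by_cases hc : x ∈ acc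
        · simpa [hq, hc] using ih acc
        · simpa [hq, hc] using ih (acc ++ [x])

-- idxOf steps over a different head
theorem pv_idxOf_cons_ne (x y : String) (xs : List String) (h : x ≠ y) :
    List.idxOf y (x :: xs) = List.idxOf y xs + 1 := by
  rw [List.idxOf_cons, Bool.cond_eq_ite, if_neg (by simpa using h)]

-- the Set.add fold splits off its accumulator
theorem pv_foldl_add_split (l acc : List String) :
    l.foldl PySem.Set.add acc
      = acc ++ (l.filter (fun y => !acc.contains y)).foldl PySem.Set.add [] := by
  match l with
  | [] => simp
  | y :: l =>
      by_cases hy : y ∈ acc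
      · have h1 : PySem.Set.add acc y = acc := by simp [PySem.Set.add, hy]
        have h2 : (y :: l).filter (fun z => !acc.contains z) = l.filter (fun z => !acc.contains z) := by
          simp [hy]
        rw [List.foldl_cons, h1, h2, pv_foldl_add_split l acc]
      · have h1 : PySem.Set.add acc y = acc ++ [y] := by simp [PySem.Set.add, hy]
        have h2 : (y :: l).filter (fun z => !acc.contains z) = y :: l.filter (fun z => !acc.contains z) := by
          simp [hy]
        have h3 : PySem.Set.add ([] : List String) y = [y] := by simp [PySem.Set.add]
        rw [List.foldl_cons, h1, h2, List.foldl_cons, h3,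
            pv_foldl_add_split l (acc ++ [y]),
            pv_foldl_add_split (l.filter (fun z => !acc.contains z)) [y]]
        have h4 : (l.filter (fun z => !acc.contains z)).filter (fun z => !([y].contains z))
            = l.filter (fun z => !(acc ++ [y]).contains z) := by
          rw [List.filter_filter]
          apply List.filter_congr
          intro z _
          simp
          exact Bool.and_comm _ _
        rw [h4]
        simp
  termination_by l.length
  decreasing_by
    · simp
    · simp
    · have := List.length_filter_le (fun z => !acc.contains z) l
      simp only [List.length_cons]
      omega

-- list(dict.fromkeys(x :: xs)) keeps x, then dedups the tail with x removed
theorem pv_dedup_cons (x : String) (xs : List String) :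
    PySem.List.dedup (x :: xs) = x :: PySem.List.dedup (xs.filter (fun y => !(y == x))) := by
  rw [PySem.List.dedup_eq_ofList, PySem.List.dedup_eq_ofList,
      PySem.Set.ofList_eq_foldl, PySem.Set.ofList_eq_foldl]
  simp only [List.foldl_cons]
  have h3 : PySem.Set.add ([] : List String) x = [x] := by simp [PySem.Set.add]
  rw [h3, pv_foldl_add_split xs [x]]
  have h4 : xs.filter (fun y => !([x].contains y)) = xs.filter (fun y => !(y == x)) := by
    apply List.filter_congr
    intro z _
    by_cases h : z = x
    · simp [h]
    · simp [h]
  rw [h4]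
  simp

-- first occurrences survive filtering in order
theorem pv_idxOf_filter_lt (xs : List String) (p : String → Bool) (a b : String)
    (ha : a ∈ xs.filter p) (hb : b ∈ xs.filter p)
    (h : (xs.filter p).idxOf a < (xs.filter p).idxOf b) :
    xs.idxOf a < xs.idxOf b := by
  induction xs with
  | nil => simp at ha
  | cons y xs ih =>
      by_cases hp : p y
      · rw [List.filter_cons_of_pos hp] at ha hb h
        by_cases hay : y = a
        · subst hay
          have hyb : y ≠ b := by
            intro hc
            subst hc
            simp [List.idxOf_cons_self] at h
          rw [List.idxOf_cons_self, pv_idxOf_cons_ne y b xs hyb]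
          omega
        · rw [pv_idxOf_cons_ne y a _ hay] at h
          have hyb : y ≠ b := by
            intro hc
            subst hc
            rw [List.idxOf_cons_self] at h
            omega
          rw [pv_idxOf_cons_ne y b _ hyb] at h
          rw [pv_idxOf_cons_ne y a xs hay, pv_idxOf_cons_ne y b xs hyb]
          have ha' : a ∈ xs.filter p := by
            rcases List.mem_cons.mp ha with h1 | h1
            · exact absurd h1.symm hay
            · exact h1
          have hb'' : b ∈ xs.filter p := by
            rcases List.mem_cons.mp hb with h1 | h1
            · exact absurd h1.symm hyb
            · exact h1
          have := ih ha' hb'' (by omega)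
          omega
      · rw [List.filter_cons_of_neg hp] at ha hb h
        have hya : y ≠ a := by
          intro hc
          subst hc
          exact hp (List.mem_filter.mp ha).2
        have hyb : y ≠ b := by
          intro hc
          subst hc
          exact hp (List.mem_filter.mp hb).2
        rw [pv_idxOf_cons_ne y a xs hya, pv_idxOf_cons_ne y b xs hyb]
        have := ih ha hb h
        omega

-- the ordered dedup is strictly increasing in first-occurrence index
theorem pv_dedup_pairwise (xs : List String) :
    (PySem.List.dedup xs).Pairwise (fun a b => xs.idxOf a < xs.idxOf b) := by
  match xs with
  | [] => simp [PySem.List.dedup_eq_ofList, PySem.Set.ofList_eq_foldl]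
  | x :: t =>
      rw [pv_dedup_cons]
      have ih := pv_dedup_pairwise (t.filter (fun y => !(y == x)))
      constructor
      · intro b hb
        have hbmem : b ∈ t.filter (fun y => !(y == x)) := (PySem.List.mem_dedup _ _).mp hb
        have hxb : x ≠ b := by
          intro hc
          subst hc
          simpa using (List.mem_filter.mp hbmem).2
        rw [List.idxOf_cons_self, pv_idxOf_cons_ne x b t hxb]
        omega
      · apply ih.imp_of_mem
        intro a b ha hb hlt
        have ha' : a ∈ t.filter (fun y => !(y == x)) := (PySem.List.mem_dedup _ _).mp ha
        have hb' : b ∈ t.filter (fun y => !(y == x)) := (PySem.List.mem_dedup _ _).mp hb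
        have hxa : x ≠ a := by
          intro hc
          subst hc
          simpa using (List.mem_filter.mp ha').2
        have hxb : x ≠ b := by
          intro hc
          subst hc
          simpa using (List.mem_filter.mp hb').2
        rw [pv_idxOf_cons_ne x a t hxa, pv_idxOf_cons_ne x b t hxb]
        have := pv_idxOf_filter_lt t _ a b ha' hb' hlt
        omega
  termination_by xs.length
  decreasing_by
    simp only [List.length_cons]
    have := List.length_filter_le (fun y => !(y == x)) t
    omega

-- enumerate projects back to the list
theorem pv_map_snd_enumerate (xs : List String) (start : Int) :
    (PySem.List.enumerate xs start).map Prod.snd = xs := by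
  induction xs generalizing start with
  | nil => simp [PySem.List.enumerate]
  | cons x t ih => simp [PySem.List.enumerate, ih]

-- find? over enumerate locates the first occurrence
theorem pv_find?_enumerate (xs : List String) (s : String) (start : Int) (h : s ∈ xs) :
    (PySem.List.enumerate xs start).find? (fun p => p.2 == s)
      = some (start + (xs.idxOf s : Int), s) := by
  induction xs generalizing start with
  | nil => simp at h
  | cons x t ih =>
      simp only [PySem.List.enumerate, List.find?_cons]
      by_cases hx : x = s
      · subst hx
        simp [List.idxOf_cons_self]
      · have hbeq : (x == s) = false := by simpa using hx
        have hmem : s ∈ t := by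
          rcases List.mem_cons.mp h with h1 | h1
          · exact absurd h1.symm hx
          · exact h1
        rw [pv_idxOf_cons_ne x s t hx]
        simp only [hbeq]
        rw [ih (start + 1) hmem]
        congr 2
        push_cast
        ring

-- the value a fold of inserts leaves for a key is the last insert for it
theorem pv_get?_foldl_insert (l : List (Int × String)) (d0 : PySem.Dict String Int) (s : String) :
    ((l.foldl (fun d p => d.insert p.2 p.1) d0).get? s)
      = (match l.reverse.find? (fun p => p.2 == s) with
         | some q => some q.1
         | none => d0.get? s) := by
  induction l generalizing d0 with
  | nil => simp
  | cons p l ih =>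
      simp only [List.foldl_cons, List.reverse_cons]
      rw [ih, List.find?_append]
      cases hf : l.reverse.find? (fun q => q.2 == s) with
      | some q => simp [Option.or]
      | none =>
          simp only [Option.or, List.find?_cons, List.find?_nil]
          by_cases hps : p.2 = s
          · have : (p.2 == s) = true := by simpa using hps
            simp only [this]
            subst hps
            simp [PySem.Dict.get?_insert_self]
          · have hne : (p.2 == s) = false := by simpa using hps
            simp only [hne]
            rw [PySem.Dict.get?_insert_of_ne _ _ (fun hc => hps hc.symm)]

-- ===== the main equality =====
theorem pv_main (profile : List (String × String)) (career_skills : List String) (limit : Int) :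
    ordered_skills_to_focus_py profile career_skills limit
      = ordered_skills_to_focus_py_alt profile career_skills limit := by
  unfold ordered_skills_to_focus_py ordered_skills_to_focus_py_alt
  simp only []
  congr 1
  -- name the pieces
  set ps := pvProfileSkills profile with hps
  set fb : List String := ["Communication", "Problem Solving", "Execution Discipline", "Learning Agility"] with hfb
  set combined := (ps.filter (fun s => career_skills.contains s)) ++ career_skills ++ fb with hcomb
  set first := ((PySem.List.enumerate combined).reverse).foldl
      (fun d p => d.insert p.2 p.1) (PySem.Dict.mk ([] : List (String × Int))) with hfirst
  -- A's three loops compute the ordered dedup of `combined`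
  have hA : fb.foldl
      (fun ordered skill => if ordered.contains skill then ordered else ordered ++ [skill])
      (career_skills.foldl
        (fun ordered skill => if ordered.contains skill then ordered else ordered ++ [skill])
        (ps.foldl
          (fun ordered skill =>
            if career_skills.contains skill && !(ordered.contains skill) then ordered ++ [skill]
            else ordered) []))
      = PySem.List.dedup combined := by
    rw [PySem.List.dedup_eq_ofList, PySem.Set.ofList_eq_foldl, hcomb,
        List.foldl_append, List.foldl_append, pv_foldl_filter]
    rfl
  -- the dict's value at any s ∈ combined is the first-occurrence index
  have hget : ∀ s ∈ combined, first.get? s = some ((combined.idxOf s : Int)) := by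
    intro s hs
    rw [hfirst, pv_get?_foldl_insert, List.reverse_reverse,
        pv_find?_enumerate combined s 0 hs]
    simp
  -- the dict's keys are a permutation of the dedup
  have hkeys : first.keys = PySem.Set.update ([] : List String)
      (((PySem.List.enumerate combined).reverse).map Prod.snd) := by
    rw [hfirst]
    have := PySem.Dict.keys_foldl_insert_key ((PySem.List.enumerate combined).reverse)
      (fun p => p.2) (fun _ p => p.1) (PySem.Dict.mk ([] : List (String × Int)))
    simpa using this
  have hkeys2 : first.keys = PySem.Set.ofList combined.reverse := by
    rw [hkeys, List.map_reverse]
    have := pv_map_snd_enumerate combined 0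
    rw [show (PySem.List.enumerate combined).map Prod.snd = combined from this]
    rfl
  have hmemkeys : ∀ a, a ∈ first.keys ↔ a ∈ combined := by
    intro a
    rw [hkeys2, PySem.Set.mem_ofList, List.mem_reverse]
  have hnodupkeys : first.keys.Nodup := by
    rw [hkeys2]
    exact PySem.Set.nodup_ofList _
  -- sorting the keys by first-occurrence index is the ordered dedup
  have hsorted : PySem.List.sorted first.keys (fun s => first.getD s 0)
      = PySem.List.dedup combined := by
    apply PySem.List.sorted_eq_of_perm_of_pairwise_lt
    · rw [List.perm_ext_iff_of_nodup (PySem.List.nodup_dedup _) hnodupkeys]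
      intro a
      rw [hmemkeys, PySem.List.mem_dedup]
    · apply (pv_dedup_pairwise combined).imp_of_mem
      intro a b ha hb hlt
      have ha' := (PySem.List.mem_dedup _ _).mp ha
      have hb' := (PySem.List.mem_dedup _ _).mp hb
      have hga : first.getD a 0 = (combined.idxOf a : Int) := by
        simp [PySem.Dict.getD, hget a ha']
      have hgb : first.getD b 0 = (combined.idxOf b : Int) := by
        simp [PySem.Dict.getD, hget b hb']
      rw [hga, hgb]
      exact_mod_cast hlt
  rw [hsorted, ← hA]

-- ===== VERDICT (by name: the statement is the Claim_ definition above) =====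
theorem ordered_skills_to_focus_py_spec : Claim_equal_ordered_skills_to_focus_py := by
  intro profile career_skills limit _
  unfold Spec_ordered_skills_to_focus_py
  exact pv_main profile career_skills limit
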